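-- pv_equiv track=rewrite | github.com/MerHS/bb-haskell | check.py | naive_2d_pattern_search
-- ===== SOURCE A (Python) =====
-- def naive_2d_pattern_search(m, n, pattern, text):
--     result = []
--
--     # iterate text lines
--     for row_idx in range(0, n - m + 1):
--         text_line = text[row_idx]
--         pat_line = pattern[0]
--         candidates = []
--
--         # find first line of pattern from current text line
--         # push candidates of column indices
--         for col_idx in range(0, n - m + 1):
--             if text_line[col_idx : col_idx + m] == pat_line:
--                 candidates.append(col_idx)
--
--         # iterate next pattern lines
--         for pat_idx, pat_rows in enumerate(pattern[1:]):
--             new_cand = []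
--             text_line = text[row_idx + pat_idx + 1]
--
--             # search candidated column indices only
--             for col_idx in candidates:
--                 if text_line[col_idx : col_idx + m] == pat_rows:
--                     new_cand.append(col_idx)
--
--             candidates = new_cand
--
--         # push survived candidates to result list
--         for col_idx in candidates:
--             result.append((row_idx + m - 1, col_idx + m - 1))
--
--     return result
-- ===== SOURCE B (Python) =====
-- def naive_2d_pattern_search(m, n, pattern, text):
--     w = n - m + 1
--     # group equal pattern rows: row string -> ascending list of its indices in pattern
--     rows = {}
--     for j, pat_row in enumerate(pattern):
--         rows[pat_row] = rows.get(pat_row, []) + [j]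
--     # ids[t][c] = indices of the pattern rows equal to text[t][c:c+m] (slice+lookup once per cell)
--     ids = [[rows.get(line[c:c + m], []) for c in range(w)] for line in text]
--     p = len(pattern)
--     result = []
--     for r in range(w):
--         for c in range(w):
--             if all(j in ids[r + j][c] for j in range(p)):
--                 result.append((r + m - 1, c + m - 1))
--     return result
-- ===== Notes on version B (the rewrite author's own statement) =====
-- stated objective: alternative
-- what changed: A refines per-start-row candidate column lists, re-slicing and re-comparing pattern rows for every start row; B builds one dictionary from pattern row to its indices, slices and looks up every text cell once into a match table, then emits matches in one flat scan over the cells.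
import Mathlib
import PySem

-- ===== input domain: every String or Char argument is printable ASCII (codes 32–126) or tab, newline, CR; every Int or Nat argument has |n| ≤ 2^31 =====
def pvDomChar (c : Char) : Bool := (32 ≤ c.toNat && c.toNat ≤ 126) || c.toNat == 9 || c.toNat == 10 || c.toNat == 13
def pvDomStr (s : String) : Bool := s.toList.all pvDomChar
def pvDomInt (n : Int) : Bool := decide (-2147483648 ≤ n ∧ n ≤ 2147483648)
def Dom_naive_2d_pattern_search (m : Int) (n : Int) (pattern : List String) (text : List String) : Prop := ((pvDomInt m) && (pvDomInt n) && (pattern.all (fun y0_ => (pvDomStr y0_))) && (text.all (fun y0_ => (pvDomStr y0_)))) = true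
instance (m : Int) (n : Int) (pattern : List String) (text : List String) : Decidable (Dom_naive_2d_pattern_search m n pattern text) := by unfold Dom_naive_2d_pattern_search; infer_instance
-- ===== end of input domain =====

-- B replaces A's per-start-row candidate refinement (re-slicing and re-comparing pattern rows for
-- every start row) by one pattern-row→indices dictionary plus a slice-lookup table computed once
-- per text cell, then a flat scan of the cells (objective: alternative; same return value).

-- ===== PORT A =====
def naive_2d_pattern_search (m : Int) (n : Int) (pattern : List String) (text : List String) : List (Int × Int) :=
  (PySem.List.pyRange 0 (n - m + 1) 1).foldl (fun result row_idx =>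
    let text_line := (PySem.List.pyGet? text row_idx).getD ""
    let pat_line := (PySem.List.pyGet? pattern 0).getD ""
    let candidates : List Int := (PySem.List.pyRange 0 (n - m + 1) 1).foldl (fun cands col_idx =>
      if PySem.Str.slice text_line (some col_idx) (some (col_idx + m)) == pat_line then
        cands ++ [col_idx] else cands) []
    let candidates := (PySem.List.enumerate (PySem.List.slice pattern (some 1) none)).foldl
      (fun cands pj =>
        let tl := (PySem.List.pyGet? text (row_idx + pj.1 + 1)).getD ""
        cands.foldl (fun nc col_idx =>
          if PySem.Str.slice tl (some col_idx) (some (col_idx + m)) == pj.2 then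
            nc ++ [col_idx] else nc) []) candidates
    result ++ candidates.map (fun col_idx => (row_idx + m - 1, col_idx + m - 1))) []

-- ===== PORT B =====
def naive_2d_pattern_search_alt (m : Int) (n : Int) (pattern : List String) (text : List String) : List (Int × Int) :=
  let w := n - m + 1
  let rows : PySem.Dict String (List Int) := (PySem.List.enumerate pattern).foldl
    (fun d pj => d.modify pj.2 [] (fun js => js ++ [pj.1])) PySem.Dict.empty
  let ids : List (List (List Int)) := text.map (fun line =>
    (PySem.List.pyRange 0 w 1).map (fun c =>
      rows.getD (PySem.Str.slice line (some c) (some (c + m))) []))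
  let p := PySem.List.len pattern
  (PySem.List.pyRange 0 w 1).foldl (fun result r =>
    (PySem.List.pyRange 0 w 1).foldl (fun result c =>
      if (PySem.List.pyRange 0 p 1).all (fun j =>
          (PySem.List.pyGetD (PySem.List.pyGetD ids (r + j) []) c []).contains j)
      then result ++ [(r + m - 1, c + m - 1)] else result) result) []


-- ===== PRECONDITION & SPEC =====
-- Pre_ excludes exactly the inputs on which A raises an IndexError: with n - m + 1 > 0 A reads
-- pattern[0] (raises on an empty pattern) and text[row_idx + pat_idx + 1] up to index
-- n - m + len(pattern) - 1 (raises when text is shorter); A returns normally everywhere else.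
def Pre_naive_2d_pattern_search (m : Int) (n : Int) (pattern : List String) (text : List String) : Prop :=
  n - m + 1 ≤ 0 ∨ (pattern ≠ [] ∧ n - m + PySem.List.len pattern ≤ PySem.List.len text)
instance (m : Int) (n : Int) (pattern : List String) (text : List String) : Decidable (Pre_naive_2d_pattern_search m n pattern text) := by unfold Pre_naive_2d_pattern_search; infer_instance

def pvWitness_naive_2d_pattern_search : Int × Int × List String × List String :=
  (2, 3, ["ab", "bb"], ["xab", "abb", "bbb"])

def Spec_naive_2d_pattern_search (m : Int) (n : Int) (pattern : List String) (text : List String) (out : List (Int × Int)) : Prop := out = naive_2d_pattern_search_alt m n pattern text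
instance (m : Int) (n : Int) (pattern : List String) (text : List String) (out : List (Int × Int)) : Decidable (Spec_naive_2d_pattern_search m n pattern text out) := by unfold Spec_naive_2d_pattern_search; infer_instance

-- ===== CLAIM (what is proved, stated in full; the proofs are below) =====
def Claim_equal_naive_2d_pattern_search : Prop := ∀ (m : Int) (n : Int) (pattern : List String) (text : List String), Dom_naive_2d_pattern_search m n pattern text → Pre_naive_2d_pattern_search m n pattern text → Spec_naive_2d_pattern_search m n pattern text (naive_2d_pattern_search m n pattern text)

-- ===== LEMMAS AND PROOFS =====

def pvLine (text : List String) (t : Int) : String := (PySem.List.pyGet? text t).getD ""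
def pvCond (m : Int) (text : List String) (t : Int) (c : Int) (row : String) : Bool :=
  PySem.Str.slice (pvLine text t) (some c) (some (c + m)) == row

lemma foldA (m : Int) (text : List String) (r : Int) (rest : List String) (s : Int) (cands : List Int) :
    (PySem.List.enumerate rest s).foldl
      (fun cands pj => cands.foldl (fun nc c =>
        if pvCond m text (r + pj.1 + 1) c pj.2 then nc ++ [c] else nc) []) cands
    = cands.filter (fun c => (PySem.List.enumerate rest s).all
        (fun pj => pvCond m text (r + pj.1 + 1) c pj.2)) := by
  induction rest generalizing s cands with
  | nil => simp [PySem.List.enumerate_nil]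
  | cons x xs ih =>
    rw [PySem.List.enumerate_cons]
    simp only [List.foldl_cons, List.all_cons]
    rw [PySem.List.foldl_append_if_eq_filter, List.nil_append, ih]
    rw [List.filter_filter]
    apply List.filter_congr
    intro c _
    rw [Bool.and_comm]

lemma rows_getD (pattern : List String) (s : String) :
    ((PySem.List.enumerate pattern).foldl
        (fun d pj => PySem.Dict.modify d pj.2 [] (fun js => js ++ [pj.1])) PySem.Dict.empty).getD s []
    = ((PySem.List.enumerate pattern).filter (fun pj => pj.2 == s)).map (fun pj => pj.1) := by
  have h := PySem.Dict.getD_foldl_modify_append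
    ((PySem.List.enumerate pattern).map (fun pj => (pj.2, pj.1))) (PySem.Dict.empty) s
  rw [List.foldl_map] at h
  simp only [h, PySem.Dict.getD_empty, List.nil_append, List.filter_map]
  rw [List.map_map]
  rfl

lemma mem_rows (pattern : List String) (s : String) (k : Nat) (hk : k < pattern.length) :
    ((k : Int) ∈ ((PySem.List.enumerate pattern).filter (fun pj => pj.2 == s)).map (fun pj => pj.1))
    ↔ pattern[k] = s := by
  simp only [List.mem_map, List.mem_filter, PySem.List.mem_enumerate_iff]
  constructor
  · rintro ⟨pj, ⟨⟨k', hk', rfl⟩, hbeq⟩, hfst⟩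
    simp only [zero_add] at hfst hbeq
    have : k' = k := by exact_mod_cast hfst
    subst this
    exact beq_iff_eq.mp hbeq
  · intro h
    exact ⟨((k : Int), pattern[k]), ⟨⟨k, hk, by simp⟩, beq_iff_eq.mpr h⟩, rfl⟩

lemma enum_shift {α : Type} (xs : List α) (s : Int) (f : Int → α → Bool) :
    (PySem.List.enumerate xs (s + 1)).all (fun pj => f pj.1 pj.2)
    = (PySem.List.enumerate xs s).all (fun pj => f (pj.1 + 1) pj.2) := by
  induction xs generalizing s with
  | nil => simp [PySem.List.enumerate_nil]
  | cons x xs ih =>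
    rw [PySem.List.enumerate_cons, PySem.List.enumerate_cons, List.all_cons, List.all_cons]
    rw [ih (s + 1)]

-- the canonical match predicate
def pvAll (m : Int) (pattern text : List String) (r c : Int) : Bool :=
  (PySem.List.enumerate pattern).all (fun pj => pvCond m text (r + pj.1) c pj.2)

lemma hA (m n : Int) (pattern text : List String) (h : String) (t : List String)
    (hp : pattern = h :: t) :
    naive_2d_pattern_search m n pattern text
    = (PySem.List.pyRange 0 (n - m + 1) 1).foldl (fun res r =>
        res ++ (((PySem.List.pyRange 0 (n - m + 1) 1).filter (pvAll m pattern text r)).map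
          (fun c => (r + m - 1, c + m - 1)))) [] := by
  unfold naive_2d_pattern_search
  apply PySem.List.foldl_congr_mem
  intro acc r _
  simp only [hp, PySem.List.slice_from_one, List.tail_cons, PySem.List.pyGet?_zero_cons,
    Option.getD_some]
  have hcd : ∀ (t' c : Int) (row : String),
      (PySem.Str.slice ((PySem.List.pyGet? text t').getD "") (some c) (some (c + m)) == row)
      = pvCond m text t' c row := fun _ _ _ => rfl
  simp only [hcd]
  rw [PySem.List.foldl_append_if_eq_filter, List.nil_append]
  rw [foldA m text r t 0]
  congr 1
  rw [List.filter_filter]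
  apply congrArg
  apply List.filter_congr
  intro c _
  rw [Bool.and_comm, pvAll, PySem.List.enumerate_cons, List.all_cons]
  congr 1
  · rw [add_zero]
  · have := enum_shift t 0 (fun i row => pvCond m text (r + i) c row)
    rw [this]
    simp only [← add_assoc]


def pvIds (m n : Int) (pattern text : List String) : List (List (List Int)) :=
  text.map (fun line =>
    (PySem.List.pyRange 0 (n - m + 1) 1).map (fun c =>
      (((PySem.List.enumerate pattern).foldl
          (fun d pj => PySem.Dict.modify d pj.2 [] (fun js => js ++ [pj.1]))
          PySem.Dict.empty)).getD (PySem.Str.slice line (some c) (some (c + m))) []))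

def pvPredB (m n : Int) (pattern text : List String) (r c : Int) : Bool :=
  (PySem.List.pyRange 0 (PySem.List.len pattern) 1).all (fun j =>
    (PySem.List.pyGetD (PySem.List.pyGetD (pvIds m n pattern text) (r + j) []) c []).contains j)

lemma hB (m n : Int) (pattern text : List String) :
    naive_2d_pattern_search_alt m n pattern text
    = (PySem.List.pyRange 0 (n - m + 1) 1).foldl (fun res r =>
        res ++ (((PySem.List.pyRange 0 (n - m + 1) 1).filter (pvPredB m n pattern text r)).map
          (fun c => (r + m - 1, c + m - 1)))) [] := by
  unfold naive_2d_pattern_search_alt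
  apply PySem.List.foldl_congr_mem
  intro acc r _
  exact PySem.List.foldl_append_if (pvPredB m n pattern text r)
    (fun c => (r + m - 1, c + m - 1)) (PySem.List.pyRange 0 (n - m + 1) 1) acc

lemma pred_eq (m n : Int) (pattern text : List String) (r c : Int)
    (hr0 : 0 ≤ r) (hrw : r < n - m + 1) (hc0 : 0 ≤ c) (hcw : c < n - m + 1)
    (hlen : n - m + (pattern.length : Int) ≤ (text.length : Int)) :
    pvPredB m n pattern text r c = pvAll m pattern text r c := by
  have hcell : ∀ (k : Nat) (hk : k < pattern.length),
      (PySem.List.pyGetD (PySem.List.pyGetD (pvIds m n pattern text) (r + (k : Int)) []) c []).contains (k : Int)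
      = (pattern[k] == PySem.Str.slice ((PySem.List.pyGet? text (r + (k : Int))).getD "")
          (some c) (some (c + m))) := by
    intro k hk
    have htl : (r + (k : Int)).toNat < text.length := by omega
    have hrj0 : (0:Int) ≤ r + (k : Int) := by omega
    have hrjlen : r + (k : Int) < ((pvIds m n pattern text).length : Int) := by
      simp only [pvIds, List.length_map]; omega
    rw [PySem.List.pyGetD_eq_getElem _ _ hrj0 hrjlen]
    have hline : (pvIds m n pattern text)[(r + (k : Int)).toNat]'(by simpa [pvIds] using htl)
        = (PySem.List.pyRange 0 (n - m + 1) 1).map (fun c =>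
            (((PySem.List.enumerate pattern).foldl
                (fun d pj => PySem.Dict.modify d pj.2 [] (fun js => js ++ [pj.1]))
                PySem.Dict.empty)).getD
              (PySem.Str.slice (text[(r + (k : Int)).toNat]'htl) (some c) (some (c + m))) []) := by
      simp only [pvIds, List.getElem_map]
    rw [hline, PySem.List.pyGetD_map_pyRange_of_nonneg _ _ _ _ hc0 hcw, rows_getD]
    rw [Bool.eq_iff_iff, List.contains_iff_mem]
    rw [mem_rows pattern _ k hk, beq_iff_eq]
    rw [PySem.List.pyGet?_eq_some_getElem text hrj0 (by omega), Option.getD_some]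
  rw [Bool.eq_iff_iff]
  simp only [pvPredB, pvAll, List.all_eq_true, PySem.List.mem_pyRange_one,
    PySem.List.mem_enumerate_iff, PySem.List.len_eq]
  constructor
  · rintro hall pj ⟨k, hk, rfl⟩
    have h1 := hall (k : Int) ⟨by omega, by omega⟩
    rw [show (0 : Int) + (k : Int) = (k : Int) from by omega] at *
    rw [hcell k hk, beq_iff_eq] at h1
    simp only [pvCond, pvLine, beq_iff_eq]
    exact h1.symm
  · intro hall j hj
    have hkj : ((j.toNat : Nat) : Int) = j := by omega
    have hk : j.toNat < pattern.length := by omega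
    rw [← hkj, hcell j.toNat hk, beq_iff_eq]
    have h1 := hall ((0 : Int) + (j.toNat : Int), pattern[j.toNat]) ⟨j.toNat, hk, rfl⟩
    simp only [pvCond, pvLine, beq_iff_eq,
      show (0 : Int) + (j.toNat : Int) = (j.toNat : Int) from by omega] at h1
    exact h1.symm

-- ===== VERDICT (by name: the statement is the Claim_ definition above) =====
theorem naive_2d_pattern_search_spec : Claim_equal_naive_2d_pattern_search := by
  intro m n pattern text _ hpre
  unfold Spec_naive_2d_pattern_search Pre_naive_2d_pattern_search at *
  by_cases hw : n - m + 1 ≤ 0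
  · simp [naive_2d_pattern_search, naive_2d_pattern_search_alt, PySem.List.pyRange_one_eq_nil hw]
  · rcases hpre with h0 | ⟨hne, hlen⟩
    · exact absurd h0 hw
    obtain ⟨h, t, rfl⟩ := List.exists_cons_of_ne_nil hne
    rw [hA m n (h :: t) text h t rfl, hB]
    apply PySem.List.foldl_congr_mem
    intro acc r hr
    apply congrArg
    apply congrArg
    apply List.filter_congr
    intro c hc
    rw [PySem.List.mem_pyRange_one] at hr hc
    exact (pred_eq m n (h :: t) text r c hr.1 hr.2 hc.1 hc.2 (by
      simpa using hlen)).symm
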